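-- pv_equiv track=rewrite | github.com/Brian-RG/Programacion-competitiva | Día 1/weird_subs.py | weird
-- ===== SOURCE A (Python) =====
-- def weird(a,b):
--     if(not a or not b):
--         return (a,b)
--     if(a>=2*b):
--         a%=(2*b)
--         return weird(a,b)
--     if(b>=2*a):
--         b%=(2*a)
--         return weird(a,b)
--     return(a,b)
-- ===== SOURCE B (Python) =====
-- def weird(a, b):
--     # Keep the pair sorted (larger first) with a swap flag, so a single
--     # reduction branch `big %= 2*small` replaces A's two symmetric branches.
--     swapped = False
--     while a and b:
--         if a < b:
--             a, b = b, a
--             swapped = not swapped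
--         if a >= 2 * b:
--             a %= 2 * b
--         else:
--             break
--     return (b, a) if swapped else (a, b)
-- ===== Notes on version B (the rewrite author's own statement) =====
-- stated objective: alternative
-- what changed: Replaces the an-branch-per-argument recursion by an iterative loop that keeps the pair ordered (larger first, with a swap flag) so a single reduction branch 'big %= 2*small' suffices.
-- outside the precondition, e.g. on weird(4, -2): A returns (0, -2), B returns (0, -2); on weird(-2, -1): A returns (0, -1), B does not finish within the time limit
import Mathlib
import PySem

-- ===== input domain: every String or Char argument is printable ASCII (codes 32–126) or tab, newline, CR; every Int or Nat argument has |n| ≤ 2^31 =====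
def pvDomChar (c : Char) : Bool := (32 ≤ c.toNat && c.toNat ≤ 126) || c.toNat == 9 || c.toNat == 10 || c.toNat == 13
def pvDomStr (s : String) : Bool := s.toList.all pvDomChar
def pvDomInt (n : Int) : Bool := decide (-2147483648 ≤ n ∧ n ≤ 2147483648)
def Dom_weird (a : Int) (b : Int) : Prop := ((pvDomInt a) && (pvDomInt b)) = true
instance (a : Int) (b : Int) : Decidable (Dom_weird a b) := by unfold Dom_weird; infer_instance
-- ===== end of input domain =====

-- B keeps the pair ordered (larger first, with a swap flag) so one reduction branch replaces
-- A's two symmetric branches; objective: alternative decomposition, same cost.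
-- Return-value equivalence only (neither program mutates anything observable).

-- ===== PORT A =====
-- A's recursion, with a fuel parameter that only makes it total (on Pre_ inputs the fuel
-- chosen below is always sufficient, proved in the lemmas).
def weirdGo : Nat → Int → Int → Int × Int
  | 0, a, b => (a, b)
  | n + 1, a, b =>
    if a = 0 ∨ b = 0 then (a, b)
    else if a ≥ 2 * b then weirdGo n (PySem.Int.mod a (2 * b)) b
    else if b ≥ 2 * a then weirdGo n a (PySem.Int.mod b (2 * a))
    else (a, b)

def weird (a : Int) (b : Int) : Int × Int :=
  weirdGo (a.natAbs + b.natAbs + 1) a b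

-- ===== PORT B =====
-- B's while loop as a tail recursion over the state (a, b, swapped), fuel for totality only.
def weirdStep : Nat → Int → Int → Bool → Int × Int
  | 0, a, b, sw => if sw then (b, a) else (a, b)
  | n + 1, a, b, sw =>
    if a ≠ 0 ∧ b ≠ 0 then
      let s := if a < b then (b, a, !sw) else (a, b, sw)
      if s.1 ≥ 2 * s.2.1 then weirdStep n (PySem.Int.mod s.1 (2 * s.2.1)) s.2.1 s.2.2
      else if s.2.2 then (s.2.1, s.1) else (s.1, s.2.1)
    else if sw then (b, a) else (a, b)

def weird_alt (a : Int) (b : Int) : Int × Int :=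
  weirdStep (a.natAbs + b.natAbs + 1) a b false

-- ===== PRECONDITION & SPEC =====
-- Pre_ excludes inputs with a negative component: there A almost always recurses without
-- bound (RecursionError), returning only in the accidental case where a negative-divisor
-- modulo lands exactly on 0, and B's loop there either agrees or loops forever.
def Pre_weird (a : Int) (b : Int) : Prop := 0 ≤ a ∧ 0 ≤ b
instance (a : Int) (b : Int) : Decidable (Pre_weird a b) := by unfold Pre_weird; infer_instance
def pvWitness_weird : Int × Int := (37, 5)

def Spec_weird (a : Int) (b : Int) (out : Int × Int) : Prop := out = weird_alt a b
instance (a : Int) (b : Int) (out : Int × Int) : Decidable (Spec_weird a b out) := by unfold Spec_weird; infer_instance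

-- ===== CLAIM (what is proved, stated in full; the proofs are below) =====
def Claim_equal_weird : Prop := ∀ (a : Int) (b : Int), Dom_weird a b → Pre_weird a b → Spec_weird a b (weird a b)

-- ===== LEMMAS AND PROOFS =====

-- Python's a % m for a positive divisor is Lean's emod.
theorem mod_pos_eq (a m : Int) (hm : 0 < m) : PySem.Int.mod a m = a % m :=
  PySem.Int.mod_eq_emod_of_pos hm

-- One reduction step strictly shrinks the reduced component (nonneg case).
theorem step_shrink (a b : Int) (ha : 0 ≤ a) (hb : 0 < b) (h : a ≥ 2 * b) :
    (PySem.Int.mod a (2 * b)).natAbs < a.natAbs := by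
  rw [mod_pos_eq a (2*b) (by omega)]
  have h1 : 0 ≤ a % (2*b) := Int.emod_nonneg a (by omega)
  have h2 : a % (2*b) < 2*b := Int.emod_lt_of_pos a (by omega)
  omega

theorem mod_nonneg' (a b : Int) (hb : 0 < 2 * b) : 0 ≤ PySem.Int.mod a (2 * b) := by
  rw [mod_pos_eq a (2*b) hb]; exact Int.emod_nonneg a (by omega)

-- A's recursion is symmetric in its two arguments (enough fuel, nonneg inputs).
theorem weirdGo_symm (n : Nat) : ∀ (f g : Nat) (a b : Int), 0 ≤ a → 0 ≤ b →
    a.natAbs + b.natAbs ≤ n → n < f → n < g →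
    weirdGo f a b = (weirdGo g b a).swap := by
  induction n with
  | zero => intro f g a b ha hb hs hf hg
            obtain ⟨f', rfl⟩ : ∃ f', f = f' + 1 := ⟨f - 1, by omega⟩
            obtain ⟨g', rfl⟩ : ∃ g', g = g' + 1 := ⟨g - 1, by omega⟩
            have : a = 0 := by omega
            have : b = 0 := by omega
            simp_all [weirdGo]
  | succ n ih =>
    intro f g a b ha hb hs hf hg
    obtain ⟨f', rfl⟩ : ∃ f', f = f' + 1 := ⟨f - 1, by omega⟩
    obtain ⟨g', rfl⟩ : ∃ g', g = g' + 1 := ⟨g - 1, by omega⟩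
    by_cases hz : a = 0 ∨ b = 0
    · simp [weirdGo, hz, or_comm.mp hz, Prod.swap]
    · push Not at hz
      have ha' : 0 < a := lt_of_le_of_ne ha (Ne.symm hz.1)
      have hb' : 0 < b := lt_of_le_of_ne hb (Ne.symm hz.2)
      have hc1 : ¬ (a = 0 ∨ b = 0) := by tauto
      have hc2 : ¬ (b = 0 ∨ a = 0) := by tauto
      by_cases h1 : a ≥ 2 * b
      · have h2 : ¬ b ≥ 2 * a := by omega
        simp only [weirdGo, if_neg hc1, if_neg hc2, if_pos h1, if_neg h2]
        exact ih f' g' _ b (mod_nonneg' a b (by omega)) hb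
          (by have := step_shrink a b ha hb' h1; omega) (by omega) (by omega)
      · by_cases h2 : b ≥ 2 * a
        · simp only [weirdGo, if_neg hc1, if_neg hc2, if_neg h1, if_pos h2]
          exact ih f' g' a _ ha (mod_nonneg' b a (by omega))
            (by have := step_shrink b a hb ha' h2; omega) (by omega) (by omega)
        · simp [weirdGo, h1, h2, Prod.swap]

-- Main correspondence: B's loop state (a, b, sw) computes A's result (swapped back if sw).
theorem step_eq_go (n : Nat) : ∀ (f g : Nat) (a b : Int) (sw : Bool), 0 ≤ a → 0 ≤ b →
    a.natAbs + b.natAbs ≤ n → n < f → n < g →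
    weirdStep g a b sw = (if sw then (weirdGo f a b).swap else weirdGo f a b) := by
  induction n with
  | zero => intro f g a b sw ha hb hs hf hg
            obtain ⟨f', rfl⟩ : ∃ f', f = f' + 1 := ⟨f - 1, by omega⟩
            obtain ⟨g', rfl⟩ : ∃ g', g = g' + 1 := ⟨g - 1, by omega⟩
            have : a = 0 := by omega
            have : b = 0 := by omega
            cases sw <;> simp_all [weirdStep, weirdGo, Prod.swap]
  | succ n ih =>
    intro f g a b sw ha hb hs hf hg
    obtain ⟨f', rfl⟩ : ∃ f', f = f' + 1 := ⟨f - 1, by omega⟩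
    obtain ⟨g', rfl⟩ : ∃ g', g = g' + 1 := ⟨g - 1, by omega⟩
    by_cases hz : a = 0 ∨ b = 0
    · have hg0 : weirdGo (f' + 1) a b = (a, b) := by simp [weirdGo, hz]
      have : ¬ (a ≠ 0 ∧ b ≠ 0) := by tauto
      cases sw <;> simp [weirdStep, this, hg0, Prod.swap]
    · push Not at hz
      have ha' : 0 < a := lt_of_le_of_ne ha (Ne.symm hz.1)
      have hb' : 0 < b := lt_of_le_of_ne hb (Ne.symm hz.2)
      by_cases hlt : a < b
      -- after the swap, B's state is (b, a, !sw)
      · by_cases h1 : b ≥ 2 * a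
        · -- B reduces b; A takes its second branch (first branch impossible since a < b)
          have hA1 : ¬ a ≥ 2 * b := by omega
          have hgo : weirdGo (f' + 1) a b = weirdGo f' a (PySem.Int.mod b (2*a)) := by
            simp [weirdGo, hz.1, hz.2, hA1, h1]
          have hstep : weirdStep (g' + 1) a b sw
              = weirdStep g' (PySem.Int.mod b (2*a)) a (!sw) := by
            simp [weirdStep, hz.1, hz.2, hlt, h1]
          rw [hstep, hgo]
          have hm : 0 ≤ PySem.Int.mod b (2*a) := mod_nonneg' b a (by omega)
          have hd : (PySem.Int.mod b (2*a)).natAbs < b.natAbs := step_shrink b a hb ha' h1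
          rw [ih g' g' _ a (!sw) hm ha (by omega) (by omega) (by omega)]
          have hsym := weirdGo_symm n g' f' _ a hm ha (by omega) (by omega) (by omega)
          cases sw <;> simp [hsym, Prod.swap]
        · -- no reduction applies: a < b < 2a (and a < 2b since a < b); both stop
          have hA1 : ¬ a ≥ 2 * b := by omega
          have hgo : weirdGo (f' + 1) a b = (a, b) := by
            simp [weirdGo, hz.1, hz.2, hA1]; omega
          have hstep : weirdStep (g' + 1) a b sw = (if (!sw) then (a, b) else (b, a)) := by
            simp [weirdStep, hz.1, hz.2, hlt, h1]
          rw [hstep, hgo]; cases sw <;> simp [Prod.swap]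
      · -- no swap: B's state stays (a, b, sw); B reduces a iff A's first branch fires
        by_cases h1 : a ≥ 2 * b
        · have hgo : weirdGo (f' + 1) a b = weirdGo f' (PySem.Int.mod a (2*b)) b := by
            simp [weirdGo, hz.1, hz.2, h1]
          have hstep : weirdStep (g' + 1) a b sw
              = weirdStep g' (PySem.Int.mod a (2*b)) b sw := by
            simp [weirdStep, hz.1, hz.2, hlt, h1]
          rw [hstep, hgo]
          have hm : 0 ≤ PySem.Int.mod a (2*b) := mod_nonneg' a b (by omega)
          have hd : (PySem.Int.mod a (2*b)).natAbs < a.natAbs := step_shrink a b ha hb' h1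
          exact ih f' g' _ b sw hm hb (by omega) (by omega) (by omega)
        · -- b ≤ a < 2b, so A's second branch needs b ≥ 2a, i.e. a = b impossible unless a ≤ 0
          have h2 : ¬ b ≥ 2 * a := by omega
          have hgo : weirdGo (f' + 1) a b = (a, b) := by
            simp [weirdGo, hz.1, hz.2, h1, h2]
          have hstep : weirdStep (g' + 1) a b sw = (if sw then (b, a) else (a, b)) := by
            simp [weirdStep, hz.1, hz.2, hlt, h1]
          rw [hstep, hgo]; cases sw <;> simp [Prod.swap]

-- ===== VERDICT (by name: the statement is the Claim_ definition above) =====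
theorem weird_spec : Claim_equal_weird := by
  intro a b _ hpre
  unfold Spec_weird weird weird_alt
  have := step_eq_go (a.natAbs + b.natAbs) (a.natAbs + b.natAbs + 1)
    (a.natAbs + b.natAbs + 1) a b false hpre.1 hpre.2 (le_refl _) (by omega) (by omega)
  simp at this
  exact this.symm
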